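-- pv_equiv track=rewrite | github.com/AnugunjNaman/PCI-Detector | Flask_Server/flask_server.py | box_util
-- ===== SOURCE A (Python) =====
-- def box_util(x):
--    bbox =[]
--    cnt = 0
--    for i in range(len(x)):
--       if i ==0 :
--          pass
--       if i>0:
--          cnt += 1
--          if cnt <= 4:
--             bbox.append(x[i])
--          else:
--             cnt = 0
--    return bbox
-- ===== SOURCE B (Python) =====
-- def box_util(x):
--     out = []
--     for k in range(0, len(x), 5):
--         out += x[k+1:k+5]
--     return out
-- ===== Notes on version B (the rewrite author's own statement) =====
-- stated objective: alternative
-- what changed: Replaces A's per-element counter/reset state machine with a loop over block starts range(0, len(x), 5) that appends the slice x[k+1:k+5] for each block, so no per-element counter state is maintained.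
import Mathlib
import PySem

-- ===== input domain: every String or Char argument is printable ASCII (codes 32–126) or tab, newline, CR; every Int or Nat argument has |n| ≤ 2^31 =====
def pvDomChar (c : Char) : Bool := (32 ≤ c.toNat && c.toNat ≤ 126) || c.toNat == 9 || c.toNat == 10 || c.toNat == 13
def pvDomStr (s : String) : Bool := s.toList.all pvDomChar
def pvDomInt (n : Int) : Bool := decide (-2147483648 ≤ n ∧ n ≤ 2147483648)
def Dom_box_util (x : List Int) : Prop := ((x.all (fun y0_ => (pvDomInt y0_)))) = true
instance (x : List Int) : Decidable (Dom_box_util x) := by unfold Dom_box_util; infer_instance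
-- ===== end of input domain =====

-- B replaces A's per-index counter/reset state machine by a loop over block starts
-- (stride-5 range) appending the slice x[k+1:k+5] per block; objective: alternative.

-- ===== PORT A =====
-- the loop body of A; the `if i == 0: pass` branch does nothing and is omitted as a no-op
def box_util_step (x : List Int) (s : List Int × Int) (i : Int) : List Int × Int :=
  if i > 0 then
    let cnt := s.2 + 1
    if cnt ≤ 4 then (s.1 ++ [PySem.List.pyGetD x i 0], cnt)
    else (s.1, 0)
  else s

def box_util (x : List Int) : List Int :=
  ((PySem.List.pyRange 0 (x.length : Int) 1).foldl (box_util_step x) ([], 0)).1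

-- ===== PORT B =====
-- the for loop of Source B: strided range over block starts, appending the slice x[k+1:k+5]
def box_util_alt (x : List Int) : List Int :=
  (PySem.List.pyRange 0 (x.length : Int) 5).foldl
    (fun out k => out ++ PySem.List.slice x (some (k + 1)) (some (k + 5))) []

-- ===== PRECONDITION & SPEC =====
def Spec_box_util (x : List Int) (out : List Int) : Prop := out = box_util_alt x
instance (x : List Int) (out : List Int) : Decidable (Spec_box_util x out) := by unfold Spec_box_util; infer_instance

-- ===== CLAIM (what is proved, stated in full; the proofs are below) =====
def Claim_equal_box_util : Prop := ∀ (x : List Int), Dom_box_util x → Spec_box_util x (box_util x)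

-- ===== LEMMAS AND PROOFS =====

-- proof-side reference function: A's keep/drop pattern as a structural recursion with a count-down
def pvGo : ℕ → List Int → List Int
  | _, [] => []
  | 0, _ :: t => pvGo 4 t
  | k + 1, a :: t => a :: pvGo k t

-- joint loop invariant for A: after processing indices 0..n-1, A's state is
-- (the filter-form result on the first n indices, (n-1) % 5) (Nat subtraction: 0 at n = 0).
lemma box_util_inv (x : List Int) (n : ℕ) :
    (PySem.List.pyRange 0 (n : Int) 1).foldl (box_util_step x) ([], 0) =
      (((List.range n).filter (fun i => i % 5 ≠ 0)).map (fun (i : ℕ) => PySem.List.pyGetD x (i : Int) 0),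
        (((n - 1) % 5 : ℕ) : Int)) := by
  induction n with
  | zero => simp [PySem.List.pyRange_one_eq_nil]
  | succ n ih =>
    have h : PySem.List.pyRange 0 ((n : Int) + 1) 1 =
        PySem.List.pyRange 0 (n : Int) 1 ++ [(n : Int)] :=
      PySem.List.pyRange_one_succ_right (by positivity)
    rw [show ((n + 1 : ℕ) : Int) = (n : Int) + 1 by push_cast; ring, h,
      List.foldl_append, ih, List.range_succ, List.filter_append, List.map_append]
    by_cases hn : n = 0
    · subst hn; simp [box_util_step]
    · have hpos : (0 : Int) < (n : Int) := by positivity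
      simp only [List.foldl_cons, List.foldl_nil, box_util_step]
      rw [if_pos (show (n : Int) > 0 from hpos)]
      by_cases h5 : n % 5 = 0
      · -- index n is dropped: counter was 4, resets to 0
        have hc : ((n - 1) % 5 : ℕ) = 4 := by omega
        rw [hc]
        norm_num
        refine ⟨by simp [h5], by omega⟩
      · -- index n is kept: counter (n-1)%5+1 = n%5 ≤ 4
        have hle : (((n - 1) % 5 : ℕ) : Int) + 1 ≤ 4 := by omega
        rw [if_pos hle]
        refine Prod.ext ?_ ?_
        · simp [h5]
        · simp; omega

-- pvGo with counter k keeps the first k elements, then restarts with counter 0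
lemma pvGo_take_drop : ∀ (k : ℕ) (t : List Int), pvGo k t = t.take k ++ pvGo 0 (t.drop k) := by
  intro k
  induction k with
  | zero => intro t; simp
  | succ k ih =>
    intro t
    cases t with
    | nil => simp [pvGo]
    | cons a t => simp [pvGo, ih t]

-- peeling the head element off the filter-map form
lemma pv_filter_map_cons (a : Int) (t : List Int) (p : ℕ → Bool) :
    ((List.range (t.length + 1)).filter p).map (fun (i : ℕ) => PySem.List.pyGetD (a :: t) (i : Int) 0)
      = (if p 0 then [a] else []) ++
        ((List.range t.length).filter (fun i => p (i + 1))).map (fun (i : ℕ) => PySem.List.pyGetD t (i : Int) 0) := by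
  rw [List.range_succ_eq_map, List.filter_cons]
  by_cases h0 : p 0
  · simp [h0, List.filter_map, Function.comp_def, Nat.succ_eq_add_one,
      PySem.List.pyGetD_natCast]
  · simp [h0, List.filter_map, Function.comp_def, Nat.succ_eq_add_one,
      PySem.List.pyGetD_natCast]

-- pvGo equals the filter form, with the counter shifting the modulo test
lemma pvGo_eq_filter : ∀ (t : List Int) (k : ℕ), k ≤ 4 →
    pvGo k t = ((List.range t.length).filter (fun i => (i + (5 - k)) % 5 ≠ 0)).map
      (fun (i : ℕ) => PySem.List.pyGetD t (i : Int) 0) := by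
  intro t
  induction t with
  | nil => intro k _; simp [pvGo]
  | cons a t ih =>
    intro k hk
    rw [List.length_cons, pv_filter_map_cons]
    cases k with
    | zero =>
      have h0 : (decide ((0 + (5 - 0)) % 5 ≠ 0)) = false := by decide
      rw [h0]
      simp only [Bool.false_eq_true, if_false, List.nil_append]
      rw [show pvGo 0 (a :: t) = pvGo 4 t from rfl, ih 4 (by omega)]
      congr 1
      apply List.filter_congr
      intro i _
      simp only [decide_eq_decide]
      omega
    | succ k =>
      have h0 : (decide ((0 + (5 - (k + 1))) % 5 ≠ 0)) = true := by
        simp only [decide_eq_true_eq]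
        omega
      rw [h0]
      simp only [if_true]
      rw [show pvGo (k + 1) (a :: t) = a :: pvGo k t from rfl, ih k (by omega)]
      simp only [List.singleton_append, List.cons.injEq, true_and]
      congr 1
      apply List.filter_congr
      intro i _
      simp only [decide_eq_decide]
      omega

-- the block fold in Nat form appends pvGo 0 x to the accumulator (any m with 5*m covering x)
lemma pv_blocks_eq : ∀ (m : ℕ) (x out : List Int), x.length ≤ 5 * m →
    (List.range m).foldl (fun out j => out ++ (x.drop (5 * j + 1)).take 4) out = out ++ pvGo 0 x := by
  intro m
  induction m with
  | zero =>
    intro x out h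
    have : x = [] := List.eq_nil_of_length_eq_zero (by omega)
    subst this
    simp [pvGo]
  | succ m ih =>
    intro x out h
    rw [List.range_succ_eq_map, List.foldl_cons, List.foldl_map]
    have hfn : (fun (out : List Int) (j : ℕ) => out ++ (x.drop (5 * j.succ + 1)).take 4)
        = (fun (out : List Int) (j : ℕ) => out ++ ((x.drop 5).drop (5 * j + 1)).take 4) := by
      funext out j
      rw [List.drop_drop, show 5 + (5 * j + 1) = 5 * j.succ + 1 from by omega]
    rw [hfn, ih (x.drop 5) _ (by rw [List.length_drop]; omega)]
    have hsplit : pvGo 0 x = (x.drop 1).take 4 ++ pvGo 0 (x.drop 5) := by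
      cases x with
      | nil => simp [pvGo]
      | cons a t =>
        rw [show pvGo 0 (a :: t) = pvGo 4 t from rfl, pvGo_take_drop 4 t]
        simp
    rw [hsplit]
    simp

-- ===== VERDICT (by name: the statement is the Claim_ definition above) =====
theorem box_util_spec : Claim_equal_box_util := by
  intro x _
  unfold Spec_box_util box_util box_util_alt
  rw [show ((x.length : Int)) = ((x.length : ℕ) : Int) from rfl, box_util_inv]
  rw [PySem.List.pyRange_of_pos 0 (x.length : Int) (by norm_num), List.foldl_map]
  have hfn : (fun (out : List Int) (j : ℕ) =>
        out ++ PySem.List.slice x (some (0 + 5 * (j : Int) + 1)) (some (0 + 5 * (j : Int) + 5)))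
      = (fun (out : List Int) (j : ℕ) => out ++ (x.drop (5 * j + 1)).take 4) := by
    funext out j
    rw [show (0 + 5 * (j : Int) + 1) = (((5 * j + 1 : ℕ)) : Int) by push_cast; ring,
      show (0 + 5 * (j : Int) + 5) = (((5 * j + 5 : ℕ)) : Int) by push_cast; ring,
      PySem.List.slice_natCast]
    congr 2
    omega
  rw [hfn]
  have hcov : x.length ≤ 5 * (if (0 : Int) < ((x.length : ℕ) : Int)
      then ((((x.length : ℕ) : Int) - 0 + 5 - 1) / 5).toNat else 0) := by
    by_cases hx : x.length = 0
    · simp [hx]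
    · have hpos : (0 : Int) < ((x.length : ℕ) : Int) := by exact_mod_cast Nat.pos_of_ne_zero hx
      rw [if_pos hpos]
      omega
  rw [pv_blocks_eq _ x [] hcov]
  rw [pvGo_eq_filter x 0 (by omega)]
  simp only [List.nil_append]
  congr 1
  apply List.filter_congr
  intro i _
  simp only [decide_eq_decide]
  omega
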